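-- pv_equiv track=rewrite | github.com/cengizandak/Wc | wc.py | usermethodlongestline
-- ===== SOURCE A (Python) =====
-- def usermethodlongestline(user_input) :
--     enbuyukline=0
--     string_line=""
--     string_line=user_input.split("\n")
--     for i in range (0,len(string_line),1):
--
--
--            if len(string_line[i])>enbuyukline:
--                 enbuyukline=len(string_line[i])
--     return enbuyukline
-- ===== SOURCE B (Python) =====
-- def usermethodlongestline(user_input):
--     best = 0
--     current = 0
--     for c in user_input:
--         if c == '\n':
--             current = 0
--         else:
--             current += 1
--             if current > best:
--                 best = current
--     return best
-- ===== Notes on version B (the rewrite author's own statement) =====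
-- stated objective: simpler
-- what changed: Single character pass with a running current/best counter instead of building the split-on-newline list and scanning it by index.
import Mathlib
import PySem

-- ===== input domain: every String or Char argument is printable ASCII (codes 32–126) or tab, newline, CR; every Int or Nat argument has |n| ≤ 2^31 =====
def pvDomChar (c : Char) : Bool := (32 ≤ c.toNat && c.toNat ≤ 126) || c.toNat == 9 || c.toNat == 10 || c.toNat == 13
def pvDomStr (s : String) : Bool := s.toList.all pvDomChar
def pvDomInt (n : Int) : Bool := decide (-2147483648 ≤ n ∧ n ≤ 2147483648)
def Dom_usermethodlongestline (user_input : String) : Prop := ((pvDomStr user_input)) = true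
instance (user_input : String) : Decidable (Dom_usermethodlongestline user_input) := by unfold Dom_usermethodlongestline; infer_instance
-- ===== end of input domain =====

-- B replaces A's split-into-lines-then-scan with a single running current/best character pass (objective: simpler).

-- ===== PORT A =====
-- user_input.split("\n") with the non-empty literal separator is exactly PySem.Chars.splitOn on the code points.
def usermethodlongestline (user_input : String) : Int :=
  let string_line := PySem.Chars.splitOn user_input.toList ['\n']
  (PySem.List.pyRange 0 (PySem.List.len string_line) 1).foldl
    (fun enbuyukline i =>
      let len_i := PySem.Chars.len (PySem.List.pyGetD string_line i [])
      if len_i > enbuyukline then len_i else enbuyukline) 0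

-- ===== PORT B =====
def usermethodlongestline_alt (user_input : String) : Int :=
  (user_input.toList.foldl
    (fun (st : Int × Int) c =>
      if c = '\n' then (st.1, 0)
      else (max st.1 (st.2 + 1), st.2 + 1)) ((0 : Int), (0 : Int))).1

-- ===== PRECONDITION & SPEC =====
def Spec_usermethodlongestline (user_input : String) (out : Int) : Prop := out = usermethodlongestline_alt user_input
instance (user_input : String) (out : Int) : Decidable (Spec_usermethodlongestline user_input out) := by unfold Spec_usermethodlongestline; infer_instance

-- ===== CLAIM (what is proved, stated in full; the proofs are below) =====
def Claim_equal_usermethodlongestline : Prop := ∀ (user_input : String), Dom_usermethodlongestline user_input → Spec_usermethodlongestline user_input (usermethodlongestline user_input)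

-- ===== LEMMAS AND PROOFS =====

-- Structural characterisation of A's split: the list of '\n'-separated chunks.
def pvChunks (cur : List Char) : List Char → List (List Char)
  | [] => [cur.reverse]
  | c :: rest => if c = '\n' then cur.reverse :: pvChunks [] rest else pvChunks (c :: cur) rest

theorem pvGo_eq_chunks (fuel : ℕ) (l cur : List Char) (acc : List (List Char))
    (h : l.length ≤ fuel) :
    PySem.Chars.splitOn.go ['\n'] fuel l cur acc = acc.reverse ++ pvChunks cur l := by
  induction fuel generalizing l cur acc with
  | zero =>
      have : l = [] := List.length_eq_zero_iff.mp (Nat.le_zero.mp h)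
      subst this
      rw [PySem.Chars.splitOn.go.eq_def]
      simp [pvChunks]
  | succ n ih =>
      cases l with
      | nil =>
          rw [PySem.Chars.splitOn.go.eq_def]
          simp [pvChunks]
      | cons c rest =>
          rw [PySem.Chars.splitOn.go.eq_def]
          simp only [List.isPrefixOf, List.length_cons] at *
          by_cases hc : c = '\n'
          · subst hc
            simp only [beq_self_eq_true, Bool.true_and, if_true, List.length_nil,
              List.drop_succ_cons, List.drop_zero]
            rw [ih rest [] (cur.reverse :: acc) (by omega)]
            simp [pvChunks]
          · have hbeq : ('\n' == c) = false := by
              simp only [beq_eq_false_iff_ne, ne_eq]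
              intro h'; exact hc h'.symm
            rw [hbeq]
            simp only [Bool.false_and, Bool.false_eq_true, if_false]
            rw [ih rest (c :: cur) acc (by omega)]
            simp [pvChunks, hc]

def pvStep (st : Int × Int) (c : Char) : Int × Int :=
  if c = '\n' then (st.1, 0) else (max st.1 (st.2 + 1), st.2 + 1)

theorem pvMain (l : List Char) (cur : List Char) (best : Int) (hb : 0 ≤ best) :
    (l.foldl pvStep (max best (cur.length : Int), (cur.length : Int))).1
      = (pvChunks cur l).foldl (fun m p => max m ((p.length : Int))) best := by
  induction l generalizing cur best with
  | nil => simp [pvChunks]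
  | cons c rest ih =>
      by_cases hc : c = '\n'
      · subst hc
        simp only [pvChunks, if_true, List.foldl_cons, pvStep, List.length_reverse]
        have := ih [] (max best (cur.length : Int)) (by positivity)
        simp only [List.length_nil, Nat.cast_zero] at this
        rw [show (max (max best (cur.length:Int)) 0) = max best (cur.length:Int) by
              have : (0:Int) ≤ max best (cur.length:Int) := le_max_of_le_left hb
              omega] at this
        exact this
      · simp only [pvChunks, hc, if_false, List.foldl_cons, pvStep]
        have := ih (c :: cur) best hb
        simp only [List.length_cons, Nat.cast_add, Nat.cast_one] at this
        rw [show max (max best (cur.length:Int)) ((cur.length:Int)+1)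
              = max best ((cur.length:Int)+1) by omega]
        exact this

-- The running-max form of A's loop body.
theorem pvIfMax (m n : Int) : (if n > m then n else m) = max m n := by
  split_ifs with h <;> omega

-- ===== VERDICT (by name: the statement is the Claim_ definition above) =====
theorem usermethodlongestline_spec : Claim_equal_usermethodlongestline := by
  intro s _
  unfold Spec_usermethodlongestline usermethodlongestline usermethodlongestline_alt
  rw [PySem.List.foldl_pyRange_zero_pyGetD
        (PySem.Chars.splitOn s.toList ['\n']) ([] : List Char)
        (fun enbuyukline p =>
          let len_i := PySem.Chars.len p
          if len_i > enbuyukline then len_i else enbuyukline) 0]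
  have hsplit : PySem.Chars.splitOn s.toList ['\n'] = pvChunks [] s.toList := by
    unfold PySem.Chars.splitOn
    rw [pvGo_eq_chunks _ _ _ _ (by omega)]
    simp
  rw [hsplit]
  have hfold : (pvChunks [] s.toList).foldl
      (fun enbuyukline p =>
        let len_i := PySem.Chars.len p
        if len_i > enbuyukline then len_i else enbuyukline) 0
      = (pvChunks [] s.toList).foldl (fun m p => max m ((p.length : Int))) 0 := by
    congr 1
    funext m p
    simp only [PySem.Chars.len_eq]
    exact pvIfMax m p.length
  rw [hfold]
  have := pvMain s.toList [] 0 le_rfl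
  simp only [List.length_nil, Nat.cast_zero, max_self] at this
  rw [← this]
  rfl
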